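-- pv_equiv track=rewrite | github.com/iAbdullahMughal/dscan | core/process/identification.py | __identify_file_type_mime
-- ===== SOURCE A (Python) =====
-- def __identify_file_type_mime(_mime_type):
--     _file_type = []
--
--     _mime_collection = {'doc': "application/msword", 'dot': "application/msword",
--                  'docx': "application/vnd.openxmlformats-officedocument.wordprocessingml.document",
--                  'dotx': "application/vnd.openxmlformats-officedocument.wordprocessingml.template",
--                  'docm': "application/vnd.ms-word.document.macroEnabled.12",
--                  'dotm': "application/vnd.ms-word.template.macroEnabled.12", 'xls': "application/vnd.ms-excel",
--                  'xlt': "application/vnd.ms-excel", 'xla': "application/vnd.ms-excel",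
--                  'xlsx': "application/vnd.openxmlformats-officedocument.spreadsheetml.sheet",
--                  'xltx': "application/vnd.openxmlformats-officedocument.spreadsheetml.template",
--                  'xlsm': "application/vnd.ms-excel.sheet.macroEnabled.12",
--                  'xltm': "application/vnd.ms-excel.template.macroEnabled.12",
--                  'xlam': "application/vnd.ms-excel.addin.macroEnabled.12",
--                  'xlsb': "application/vnd.ms-excel.sheet.binary.macroEnabled.12",
--                  'ppt': "application/vnd.ms-powerpoint", 'pot': "application/vnd.ms-powerpoint",
--                  'pps': "application/vnd.ms-powerpoint", 'ppa': "application/vnd.ms-powerpoint",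
--                  'pptx': "application/vnd.openxmlformats-officedocument.presentationml.presentation",
--                  'potx': "application/vnd.openxmlformats-officedocument.presentationml.template",
--                  'ppsx': "application/vnd.openxmlformats-officedocument.presentationml.slideshow",
--                  'ppam': "application/vnd.ms-powerpoint.addin.macroEnabled.12",
--                  'pptm': "application/vnd.ms-powerpoint.presentation.macroEnabled.12",
--                  'potm': "application/vnd.ms-powerpoint.presentation.macroEnabled.12",
--                  'ppsm': "application/vnd.ms-powerpoint.slideshow.macroEnabled.12"}
--     for __file_type, __mime_type in _mime_collection.items():
--         if _mime_type == __mime_type: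
--             _file_type.append(__file_type)
--     return True, _file_type
-- ===== SOURCE B (Python) =====
-- # B: an early-return decision chain keyed on the mime string -- no table, no
-- # loop, no dict; each branch returns the extension group as a literal.
-- def __identify_file_type_mime(_mime_type):
--     if _mime_type == "application/msword":
--         return True, ['doc', 'dot']
--     if _mime_type == "application/vnd.openxmlformats-officedocument.wordprocessingml.document":
--         return True, ['docx']
--     if _mime_type == "application/vnd.openxmlformats-officedocument.wordprocessingml.template":
--         return True, ['dotx']
--     if _mime_type == "application/vnd.ms-word.document.macroEnabled.12":
--         return True, ['docm']
--     if _mime_type == "application/vnd.ms-word.template.macroEnabled.12":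
--         return True, ['dotm']
--     if _mime_type == "application/vnd.ms-excel":
--         return True, ['xls', 'xlt', 'xla']
--     if _mime_type == "application/vnd.openxmlformats-officedocument.spreadsheetml.sheet":
--         return True, ['xlsx']
--     if _mime_type == "application/vnd.openxmlformats-officedocument.spreadsheetml.template":
--         return True, ['xltx']
--     if _mime_type == "application/vnd.ms-excel.sheet.macroEnabled.12":
--         return True, ['xlsm']
--     if _mime_type == "application/vnd.ms-excel.template.macroEnabled.12":
--         return True, ['xltm']
--     if _mime_type == "application/vnd.ms-excel.addin.macroEnabled.12":
--         return True, ['xlam']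
--     if _mime_type == "application/vnd.ms-excel.sheet.binary.macroEnabled.12":
--         return True, ['xlsb']
--     if _mime_type == "application/vnd.ms-powerpoint":
--         return True, ['ppt', 'pot', 'pps', 'ppa']
--     if _mime_type == "application/vnd.openxmlformats-officedocument.presentationml.presentation":
--         return True, ['pptx']
--     if _mime_type == "application/vnd.openxmlformats-officedocument.presentationml.template":
--         return True, ['potx']
--     if _mime_type == "application/vnd.openxmlformats-officedocument.presentationml.slideshow":
--         return True, ['ppsx']
--     if _mime_type == "application/vnd.ms-powerpoint.addin.macroEnabled.12":
--         return True, ['ppam']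
--     if _mime_type == "application/vnd.ms-powerpoint.presentation.macroEnabled.12":
--         return True, ['pptm', 'potm']
--     if _mime_type == "application/vnd.ms-powerpoint.slideshow.macroEnabled.12":
--         return True, ['ppsm']
--     return True, []
-- ===== Notes on version B (the rewrite author's own statement) =====
-- stated objective: alternative
-- what changed: Replaces A's loop over the 26 (extension, mime) dict entries with an early-return decision chain: one equality test per known mime, each branch returning its extension group as a literal, with (True, []) as the fall-through.
import Mathlib
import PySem

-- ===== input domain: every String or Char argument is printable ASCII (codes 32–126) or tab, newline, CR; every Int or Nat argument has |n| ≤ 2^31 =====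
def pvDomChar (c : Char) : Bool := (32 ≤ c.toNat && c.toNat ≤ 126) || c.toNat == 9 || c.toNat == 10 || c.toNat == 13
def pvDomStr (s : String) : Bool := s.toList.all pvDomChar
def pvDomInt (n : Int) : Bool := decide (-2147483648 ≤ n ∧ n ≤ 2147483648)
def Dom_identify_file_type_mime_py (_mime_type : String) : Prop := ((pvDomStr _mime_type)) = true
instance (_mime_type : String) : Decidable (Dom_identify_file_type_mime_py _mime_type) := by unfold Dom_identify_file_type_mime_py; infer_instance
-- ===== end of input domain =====

-- B replaces A's per-call loop over the 26 (extension, mime) dict entries by an early-return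
-- decision chain, one equality test per known mime; same return value everywhere (alternative decomposition).


-- ===== PORT A =====
-- _mime_collection.items() in insertion order
def pvMimeItems : List (String × String) := [
  ("doc", "application/msword"),
  ("dot", "application/msword"),
  ("docx", "application/vnd.openxmlformats-officedocument.wordprocessingml.document"),
  ("dotx", "application/vnd.openxmlformats-officedocument.wordprocessingml.template"),
  ("docm", "application/vnd.ms-word.document.macroEnabled.12"),
  ("dotm", "application/vnd.ms-word.template.macroEnabled.12"),
  ("xls", "application/vnd.ms-excel"),
  ("xlt", "application/vnd.ms-excel"),
  ("xla", "application/vnd.ms-excel"),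
  ("xlsx", "application/vnd.openxmlformats-officedocument.spreadsheetml.sheet"),
  ("xltx", "application/vnd.openxmlformats-officedocument.spreadsheetml.template"),
  ("xlsm", "application/vnd.ms-excel.sheet.macroEnabled.12"),
  ("xltm", "application/vnd.ms-excel.template.macroEnabled.12"),
  ("xlam", "application/vnd.ms-excel.addin.macroEnabled.12"),
  ("xlsb", "application/vnd.ms-excel.sheet.binary.macroEnabled.12"),
  ("ppt", "application/vnd.ms-powerpoint"),
  ("pot", "application/vnd.ms-powerpoint"),
  ("pps", "application/vnd.ms-powerpoint"),
  ("ppa", "application/vnd.ms-powerpoint"),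
  ("pptx", "application/vnd.openxmlformats-officedocument.presentationml.presentation"),
  ("potx", "application/vnd.openxmlformats-officedocument.presentationml.template"),
  ("ppsx", "application/vnd.openxmlformats-officedocument.presentationml.slideshow"),
  ("ppam", "application/vnd.ms-powerpoint.addin.macroEnabled.12"),
  ("pptm", "application/vnd.ms-powerpoint.presentation.macroEnabled.12"),
  ("potm", "application/vnd.ms-powerpoint.presentation.macroEnabled.12"),
  ("ppsm", "application/vnd.ms-powerpoint.slideshow.macroEnabled.12")]

-- Port of A: the for-loop over the dict's items, appending matching extensions.
def identify_file_type_mime_py (_mime_type : String) : Bool × List String :=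
  (true, pvMimeItems.foldl (fun acc p => if _mime_type = p.2 then acc ++ [p.1] else acc) [])

-- ===== PORT B =====
-- Port of B: the early-return chain of Source B, one branch per known mime, fall-through (true, []).
def identify_file_type_mime_py_alt (_mime_type : String) : Bool × List String :=
  if _mime_type = "application/msword" then (true, ["doc", "dot"]) else
  if _mime_type = "application/vnd.openxmlformats-officedocument.wordprocessingml.document" then (true, ["docx"]) else
  if _mime_type = "application/vnd.openxmlformats-officedocument.wordprocessingml.template" then (true, ["dotx"]) else
  if _mime_type = "application/vnd.ms-word.document.macroEnabled.12" then (true, ["docm"]) else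
  if _mime_type = "application/vnd.ms-word.template.macroEnabled.12" then (true, ["dotm"]) else
  if _mime_type = "application/vnd.ms-excel" then (true, ["xls", "xlt", "xla"]) else
  if _mime_type = "application/vnd.openxmlformats-officedocument.spreadsheetml.sheet" then (true, ["xlsx"]) else
  if _mime_type = "application/vnd.openxmlformats-officedocument.spreadsheetml.template" then (true, ["xltx"]) else
  if _mime_type = "application/vnd.ms-excel.sheet.macroEnabled.12" then (true, ["xlsm"]) else
  if _mime_type = "application/vnd.ms-excel.template.macroEnabled.12" then (true, ["xltm"]) else
  if _mime_type = "application/vnd.ms-excel.addin.macroEnabled.12" then (true, ["xlam"]) else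
  if _mime_type = "application/vnd.ms-excel.sheet.binary.macroEnabled.12" then (true, ["xlsb"]) else
  if _mime_type = "application/vnd.ms-powerpoint" then (true, ["ppt", "pot", "pps", "ppa"]) else
  if _mime_type = "application/vnd.openxmlformats-officedocument.presentationml.presentation" then (true, ["pptx"]) else
  if _mime_type = "application/vnd.openxmlformats-officedocument.presentationml.template" then (true, ["potx"]) else
  if _mime_type = "application/vnd.openxmlformats-officedocument.presentationml.slideshow" then (true, ["ppsx"]) else
  if _mime_type = "application/vnd.ms-powerpoint.addin.macroEnabled.12" then (true, ["ppam"]) else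
  if _mime_type = "application/vnd.ms-powerpoint.presentation.macroEnabled.12" then (true, ["pptm", "potm"]) else
  if _mime_type = "application/vnd.ms-powerpoint.slideshow.macroEnabled.12" then (true, ["ppsm"]) else
  (true, [])

-- ===== PRECONDITION & SPEC =====
def Spec_identify_file_type_mime_py (_mime_type : String) (out : Bool × List String) : Prop := out = identify_file_type_mime_py_alt _mime_type
instance (_mime_type : String) (out : Bool × List String) : Decidable (Spec_identify_file_type_mime_py _mime_type out) := by unfold Spec_identify_file_type_mime_py; infer_instance

-- ===== CLAIM =====
def Claim_equal_identify_file_type_mime_py : Prop := ∀ (_mime_type : String), Dom_identify_file_type_mime_py _mime_type → Spec_identify_file_type_mime_py _mime_type (identify_file_type_mime_py _mime_type)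

-- ===== LEMMAS AND PROOFS =====

-- ===== VERDICT =====
set_option maxHeartbeats 4000000 in
theorem identify_file_type_mime_py_spec : Claim_equal_identify_file_type_mime_py := by
  intro _mime_type _hdom
  unfold Spec_identify_file_type_mime_py
  by_cases h0 : _mime_type = "application/msword"
  · subst h0; decide
  by_cases h1 : _mime_type = "application/vnd.openxmlformats-officedocument.wordprocessingml.document"
  · subst h1; decide
  by_cases h2 : _mime_type = "application/vnd.openxmlformats-officedocument.wordprocessingml.template"
  · subst h2; decide
  by_cases h3 : _mime_type = "application/vnd.ms-word.document.macroEnabled.12"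
  · subst h3; decide
  by_cases h4 : _mime_type = "application/vnd.ms-word.template.macroEnabled.12"
  · subst h4; decide
  by_cases h5 : _mime_type = "application/vnd.ms-excel"
  · subst h5; decide
  by_cases h6 : _mime_type = "application/vnd.openxmlformats-officedocument.spreadsheetml.sheet"
  · subst h6; decide
  by_cases h7 : _mime_type = "application/vnd.openxmlformats-officedocument.spreadsheetml.template"
  · subst h7; decide
  by_cases h8 : _mime_type = "application/vnd.ms-excel.sheet.macroEnabled.12"
  · subst h8; decide
  by_cases h9 : _mime_type = "application/vnd.ms-excel.template.macroEnabled.12"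
  · subst h9; decide
  by_cases h10 : _mime_type = "application/vnd.ms-excel.addin.macroEnabled.12"
  · subst h10; decide
  by_cases h11 : _mime_type = "application/vnd.ms-excel.sheet.binary.macroEnabled.12"
  · subst h11; decide
  by_cases h12 : _mime_type = "application/vnd.ms-powerpoint"
  · subst h12; decide
  by_cases h13 : _mime_type = "application/vnd.openxmlformats-officedocument.presentationml.presentation"
  · subst h13; decide
  by_cases h14 : _mime_type = "application/vnd.openxmlformats-officedocument.presentationml.template"
  · subst h14; decide
  by_cases h15 : _mime_type = "application/vnd.openxmlformats-officedocument.presentationml.slideshow"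
  · subst h15; decide
  by_cases h16 : _mime_type = "application/vnd.ms-powerpoint.addin.macroEnabled.12"
  · subst h16; decide
  by_cases h17 : _mime_type = "application/vnd.ms-powerpoint.presentation.macroEnabled.12"
  · subst h17; decide
  by_cases h18 : _mime_type = "application/vnd.ms-powerpoint.slideshow.macroEnabled.12"
  · subst h18; decide
  simp [identify_file_type_mime_py, identify_file_type_mime_py_alt, pvMimeItems,
    h0, h1, h2, h3, h4, h5, h6, h7, h8, h9, h10, h11, h12, h13, h14, h15, h16, h17, h18]
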